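-- pv_equiv track=rewrite | github.com/Marmo77/MATURA_INFORMATYKA_2026 | Wlasne/2021-1-2.py | cyfrowe_dopelnienie
-- ===== SOURCE A (Python) =====
-- def cyfrowe_dopelnienie(n):
--     d = 0
--     n_dup = n
--     mnoznik = 1
--     while n_dup > 0:
--         #dla kazdej liczby która przechodzimy to bierzemy ją i odwracamy i dopisujemy ją do wyniku
--         ostatnia = n_dup % 10
--
--         dopelniajaca = 9 - ostatnia #jesli ostatnia to 6 to => 9-6 = 3
--
--         d = d + dopelniajaca * mnoznik
--
--         mnoznik *= 10
--         n_dup = n_dup // 10 # skracamy o ostatnia cyfre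
--
--     return d
-- ===== SOURCE B (Python) =====
-- def cyfrowe_dopelnienie(n):
--     # 9's complement of each digit: equals (10**len - 1) - n, so find the
--     # smallest power of 10 exceeding n and subtract.
--     if n <= 0:
--         return 0
--     p = 1
--     while p <= n:
--         p *= 10
--     return p - 1 - n
-- ===== Notes on version B (the rewrite author's own statement) =====
-- stated objective: simpler
-- what changed: Replaces the per-digit modulo/division loop that rebuilds the complement with a closed form: find the smallest power of 10 exceeding n and return p - 1 - n (no digit extraction, no multiplier accumulator).
import Mathlib
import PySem

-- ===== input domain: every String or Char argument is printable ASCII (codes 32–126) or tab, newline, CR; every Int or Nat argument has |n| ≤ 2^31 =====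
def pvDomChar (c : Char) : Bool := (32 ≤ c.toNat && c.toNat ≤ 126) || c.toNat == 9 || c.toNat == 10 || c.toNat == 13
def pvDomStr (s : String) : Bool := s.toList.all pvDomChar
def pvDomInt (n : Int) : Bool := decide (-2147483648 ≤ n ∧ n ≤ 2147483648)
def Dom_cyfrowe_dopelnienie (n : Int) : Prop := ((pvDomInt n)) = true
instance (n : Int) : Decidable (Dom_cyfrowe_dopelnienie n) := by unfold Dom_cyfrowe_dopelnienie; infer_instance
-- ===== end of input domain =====

-- B replaces A's per-digit modulo/division accumulation with the closed form
-- p - 1 - n for the smallest power of 10 exceeding n (objective: simpler).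

-- ===== PORT A =====
-- while n_dup > 0: d += (9 - n_dup % 10) * mnoznik; mnoznik *= 10; n_dup //= 10
def cyfDopLoop (n_dup d mnoznik : Int) : Int :=
  if h : n_dup > 0 then
    cyfDopLoop (PySem.Int.floordiv n_dup 10)
      (d + (9 - PySem.Int.mod n_dup 10) * mnoznik) (mnoznik * 10)
  else d
termination_by n_dup.toNat
decreasing_by
  rw [PySem.Int.floordiv_eq_ediv_of_pos (by norm_num)]
  omega

def cyfrowe_dopelnienie (n : Int) : Int := cyfDopLoop n 0 1

-- ===== PORT B =====
-- while p <= n: p *= 10   ('1 ≤ p' is a totality guard only: p starts at 1 and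
-- only grows, so it is always true on the calls the port makes)
def pow10Loop (n p : Int) : Int :=
  if h : p ≤ n ∧ 1 ≤ p then pow10Loop n (p * 10) else p
termination_by (n + 1 - p).toNat
decreasing_by omega

def cyfrowe_dopelnienie_alt (n : Int) : Int :=
  if n ≤ 0 then 0 else pow10Loop n 1 - 1 - n

-- ===== PRECONDITION & SPEC =====
def Spec_cyfrowe_dopelnienie (n : Int) (out : Int) : Prop := out = cyfrowe_dopelnienie_alt n
instance (n : Int) (out : Int) : Decidable (Spec_cyfrowe_dopelnienie n out) := by unfold Spec_cyfrowe_dopelnienie; infer_instance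

-- ===== CLAIM (what is proved, stated in full; the proofs are below) =====
def Claim_equal_cyfrowe_dopelnienie : Prop := ∀ (n : Int), Dom_cyfrowe_dopelnienie n → Spec_cyfrowe_dopelnienie n (cyfrowe_dopelnienie n)

-- ===== LEMMAS AND PROOFS =====

-- pow10Loop commutes with cutting off the last digit.
lemma pow10Loop_div10 : ∀ (k : ℕ) (n p : Int), (n + 1 - 10 * p).toNat ≤ k → 1 ≤ p →
    pow10Loop n (10 * p) = 10 * pow10Loop (n / 10) p := by
  intro k
  induction k with
  | zero =>
    intro n p hk hp
    conv_lhs => rw [pow10Loop]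
    conv_rhs => rw [pow10Loop]
    rw [dif_neg (by omega), dif_neg (by omega)]
  | succ k ih =>
    intro n p hk hp
    by_cases hc : p ≤ n / 10
    · have h10 : 10 * p ≤ n := by omega
      rw [pow10Loop]
      rw [dif_pos ⟨h10, by omega⟩]
      have : 10 * p * 10 = 10 * (10 * p) := by ring
      rw [this, ih n (10 * p) (by omega) (by omega)]
      conv_rhs => rw [pow10Loop]
      rw [dif_pos ⟨hc, hp⟩, mul_comm p 10]
    · conv_lhs => rw [pow10Loop]
      conv_rhs => rw [pow10Loop]
      rw [dif_neg (by omega), dif_neg (by omega)]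

-- A's loop in terms of B's power search.
lemma cyfDopLoop_eq : ∀ (k : ℕ) (nd : Int), nd.toNat ≤ k → 0 ≤ nd → ∀ (d m : Int),
    cyfDopLoop nd d m = d + m * (pow10Loop nd 1 - 1 - nd) := by
  intro k
  induction k with
  | zero =>
    intro nd hk h0 d m
    have hnd : nd = 0 := by omega
    subst hnd
    rw [cyfDopLoop, dif_neg (by omega), pow10Loop, dif_neg (by omega)]
    ring
  | succ k ih =>
    intro nd hk h0 d m
    by_cases hp : nd > 0
    · rw [cyfDopLoop, dif_pos hp]
      rw [PySem.Int.floordiv_eq_ediv_of_pos (by norm_num),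
          PySem.Int.mod_eq_emod_of_pos (by norm_num)]
      rw [ih (nd / 10) (by omega) (by omega)]
      have hstep : pow10Loop nd 1 = 10 * pow10Loop (nd / 10) 1 := by
        conv_lhs => rw [pow10Loop]
        rw [dif_pos ⟨by omega, le_refl 1⟩]
        have h1 : (1 : Int) * 10 = 10 * 1 := by ring
        rw [h1, pow10Loop_div10 (nd + 1 - 10).toNat nd 1 (by omega) (by omega)]
      rw [hstep]
      have hsplit : nd = 10 * (nd / 10) + nd % 10 := by omega
      linear_combination m * hsplit
    · have hnd : nd = 0 := by omega
      subst hnd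
      rw [cyfDopLoop, dif_neg (by omega), pow10Loop, dif_neg (by omega)]
      ring

-- ===== VERDICT (by name: the statement is the Claim_ definition above) =====
theorem cyfrowe_dopelnienie_spec : Claim_equal_cyfrowe_dopelnienie := by
  intro n _
  unfold Spec_cyfrowe_dopelnienie cyfrowe_dopelnienie cyfrowe_dopelnienie_alt
  by_cases hn : n ≤ 0
  · rw [if_pos hn, cyfDopLoop, dif_neg (by omega)]
  · rw [if_neg hn, cyfDopLoop_eq n.toNat n (le_refl _) (by omega)]
    ring
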